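-- pv_equiv track=rewrite | github.com/SongY123/DataFactory | src/web/service/agentic_synthesis_service.py | _clean_question_text
-- ===== SOURCE A (Python) =====
-- def _clean_question_text(raw_question: str) -> str:
--     text = str(raw_question or "").strip()
--     if not text:
--         return ""
--
--     lowered = text.lower()
--     if lowered.startswith("question:"):
--         text = text.split(":", 1)[1].strip()
--
--     for marker in ["\ntrajectory:", "trajectory:", "<analyze>", "<understand>", "<code>", "<execute>", "<answer>"]:
--         idx = text.lower().find(marker)
--         if idx >= 0:
--             text = text[:idx].strip()
--
--     text = " ".join(text.split())
--     if not text: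
--         return ""
--     return text
-- ===== SOURCE B (Python) =====
-- _MARKERS = ["\ntrajectory:", "trajectory:", "<analyze>", "<understand>", "<code>", "<execute>", "<answer>"]
--
--
-- def _drop_question_prefix(text):
--     if text.lower().startswith("question:"):
--         return text.split(":", 1)[1].strip()
--     return text
--
--
-- def _truncate_at_marker(text):
--     low = text.lower()
--     for i in range(len(low)):
--         if any(low.startswith(m, i) for m in _MARKERS):
--             return text[:i].strip()
--     return text
--
--
-- def _normalize_ws(text):
--     return " ".join(text.split())
--
--
-- def _clean_question_text(raw_question: str) -> str:
--     text = str(raw_question or "").strip()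
--     if not text:
--         return ""
--     return _normalize_ws(_truncate_at_marker(_drop_question_prefix(text)))
-- ===== Notes on version B (the rewrite author's own statement) =====
-- stated objective: alternative
-- what changed: A's seven sequential truncate-and-strip passes (one lowered find per marker, each rescanning the shrunken text) are replaced by a staged pipeline whose truncation is a single position-major left-to-right scan of the lowered text that stops at the first position where any marker starts and cuts there once; the earliest such position equals the position A's iterative loop ends up cutting at.
import Mathlib
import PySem

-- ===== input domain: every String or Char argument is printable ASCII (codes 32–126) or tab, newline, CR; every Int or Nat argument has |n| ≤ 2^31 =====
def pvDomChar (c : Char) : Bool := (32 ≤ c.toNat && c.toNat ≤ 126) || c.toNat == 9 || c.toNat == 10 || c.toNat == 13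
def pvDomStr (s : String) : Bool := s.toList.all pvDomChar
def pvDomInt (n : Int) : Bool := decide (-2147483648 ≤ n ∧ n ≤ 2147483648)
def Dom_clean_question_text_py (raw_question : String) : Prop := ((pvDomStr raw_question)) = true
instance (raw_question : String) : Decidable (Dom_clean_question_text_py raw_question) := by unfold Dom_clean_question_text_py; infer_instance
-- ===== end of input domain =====

-- B replaces A's seven sequential truncate-and-strip passes by a staged pipeline whose truncation
-- is ONE position-major left-to-right scan of the lowered text, cutting at the first position where
-- any marker starts; same return value, alternative structure.

-- ===== PORT A =====
-- the marker list of A's for-loop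
def pvMarkers : List String := ["\ntrajectory:", "trajectory:", "<analyze>", "<understand>", "<code>", "<execute>", "<answer>"]

def clean_question_text_py (raw_question : String) : String :=
  -- text = str(raw_question or "").strip()
  let text := PySem.Str.strip (if raw_question = "" then "" else raw_question)
  if text = "" then ""
  else
    let lowered := PySem.Str.lower text
    -- text.split(":", 1)[1]: taken only when text starts with "question:", so ':' occurs and
    -- the split has a part 1; List.getD's default "" is unreachable
    let text := if PySem.Str.startswith lowered "question:" then
        PySem.Str.strip (((PySem.Str.splitMax? text ":" 1).getD []).getD 1 "")
      else text
    let text := pvMarkers.foldl (fun t marker =>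
        let idx := PySem.Str.find (PySem.Str.lower t) marker
        if 0 ≤ idx then PySem.Str.strip (PySem.Str.slice t none (some idx)) else t) text
    let text := PySem.Str.join " " (PySem.Str.split₀ text)
    if text = "" then "" else text

-- ===== PORT B =====
-- _MARKERS of Source B, as character lists (the scanner works on the lowered code points)
def pvMarkersC : List (List Char) :=
  [['\n','t','r','a','j','e','c','t','o','r','y',':'],
   ['t','r','a','j','e','c','t','o','r','y',':'],
   ['<','a','n','a','l','y','z','e','>'],
   ['<','u','n','d','e','r','s','t','a','n','d','>'],
   ['<','c','o','d','e','>'],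
   ['<','e','x','e','c','u','t','e','>'],
   ['<','a','n','s','w','e','r','>']]

-- the for-i/any loop of _truncate_at_marker: walk the lowered text left to right, return the
-- first index at which some marker starts (low.startswith(m, i)), else None
def pvScan (suf : List Char) (i : Nat) : Option Nat :=
  match suf with
  | [] => none
  | c :: rest =>
    if pvMarkersC.any (fun m => PySem.Chars.startswith (c :: rest) m) then some i
    else pvScan rest (i + 1)

-- _drop_question_prefix
def pvDropQuestionPrefix (text : String) : String :=
  if PySem.Str.startswith (PySem.Str.lower text) "question:" then
    PySem.Str.strip (((PySem.Str.splitMax? text ":" 1).getD []).getD 1 "")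
  else text

-- _truncate_at_marker
def pvTruncateAtMarker (text : String) : String :=
  match pvScan (PySem.Str.lower text).toList 0 with
  | some i => PySem.Str.strip (PySem.Str.slice text none (some (i : Int)))
  | none => text

-- _normalize_ws
def pvNormalizeWs (text : String) : String := PySem.Str.join " " (PySem.Str.split₀ text)

def clean_question_text_py_alt (raw_question : String) : String :=
  let text := PySem.Str.strip (if raw_question = "" then "" else raw_question)
  if text = "" then ""
  else pvNormalizeWs (pvTruncateAtMarker (pvDropQuestionPrefix text))

-- ===== PRECONDITION & SPEC =====
def Spec_clean_question_text_py (raw_question : String) (out : String) : Prop := out = clean_question_text_py_alt raw_question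
instance (raw_question : String) (out : String) : Decidable (Spec_clean_question_text_py raw_question out) := by unfold Spec_clean_question_text_py; infer_instance

-- ===== CLAIM (what is proved, stated in full; the proofs are below) =====
def Claim_equal_clean_question_text_py : Prop := ∀ (raw_question : String), Dom_clean_question_text_py raw_question → Spec_clean_question_text_py raw_question (clean_question_text_py raw_question)

-- ===== LEMMAS AND PROOFS =====

-- Chars-level mirrors of A's loop body and of the leftmost cut via per-marker first hits
def pvStepC (t m : List Char) : List Char :=
  if 0 ≤ PySem.Chars.find (PySem.Chars.lower t) m then
    PySem.Chars.strip (PySem.Chars.slice t none (some (PySem.Chars.find (PySem.Chars.lower t) m)))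
  else t

def pvHitC (t m : List Char) : Option Nat :=
  if 0 ≤ PySem.Chars.find (PySem.Chars.lower t) m then
    some (PySem.Chars.find (PySem.Chars.lower t) m).toNat
  else none

def pvCutC (t : List Char) (ms : List (List Char)) : List Char :=
  match (ms.filterMap (pvHitC t)).min? with
  | some j => PySem.Chars.strip (PySem.Chars.slice t none (some (j : Int)))
  | none => t

-- some marker occurs in low at position j
def pvOcc (low : List Char) (j : Nat) : Prop := ∃ m ∈ pvMarkersC, m <+: low.drop j

-- no proper suffix of m' is prefix-comparable with m (rules out occurrences straddling a cut)
def pvNoCross (m m' : List Char) : Bool :=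
  (List.range m'.length).all fun k =>
    k == 0 || (!((m'.drop k).isPrefixOf m) && !(m.isPrefixOf (m'.drop k)))


-- lowering a character does not change whether it is whitespace
theorem pv_ws_lowerChar (c : Char) : PySem.Chars.isspace (PySem.Chars.lowerChar c) = PySem.Chars.isspace c := by
  by_cases h : PySem.Chars.isupper c = true
  · have hb : 65 ≤ c.toNat ∧ c.toNat ≤ 90 := by
      simpa [PySem.Chars.isupper, Char.le_def] using h
    have hval : Nat.isValidChar (c.toNat + 32) := by unfold Nat.isValidChar; omega
    have hv : (Char.ofNat (c.toNat + 32)).toNat = c.toNat + 32 := by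
      rw [Char.toNat_ofNat, if_pos hval]
    simp only [PySem.Chars.lowerChar, if_pos h, PySem.Chars.isspace, hv]
    rw [Bool.eq_iff_iff]
    simp only [Bool.or_eq_true, Bool.and_eq_true, decide_eq_true_eq]
    omega
  · simp [PySem.Chars.lowerChar, h]

theorem pv_rstrip_prefix (x : List Char) : PySem.Chars.rstrip x <+: x := by
  unfold PySem.Chars.rstrip
  have h := List.dropWhile_suffix (l := x.reverse) PySem.Chars.isspace
  have h2 := (List.reverse_prefix (l₁ := List.dropWhile PySem.Chars.isspace x.reverse) (l₂ := x.reverse)).mpr h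
  simpa using h2

theorem pv_lstrip_of_stripped {t : List Char} (h : PySem.Chars.strip t = t) :
    List.dropWhile PySem.Chars.isspace t = t := by
  have hsuf : List.dropWhile PySem.Chars.isspace t <:+ t := List.dropWhile_suffix _
  have hpre : PySem.Chars.strip t <+: List.dropWhile PySem.Chars.isspace t := by
    unfold PySem.Chars.strip PySem.Chars.lstrip
    exact pv_rstrip_prefix _
  rw [h] at hpre
  exact List.IsSuffix.eq_of_length hsuf (Nat.le_antisymm hsuf.length_le hpre.length_le)

-- everything that rstrip removes is whitespace
theorem pv_rstrip_ws (x : List Char) (i : Nat) (h1 : (PySem.Chars.rstrip x).length ≤ i)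
    (h2 : i < x.length) : PySem.Chars.isspace x[i] = true := by
  have hlen : (PySem.Chars.rstrip x).length = (List.dropWhile PySem.Chars.isspace x.reverse).length := by
    unfold PySem.Chars.rstrip; simp
  have hjlt : x.length - 1 - i < x.reverse.length := by simp; omega
  have he : x.reverse[x.length - 1 - i] = x[i] := by
    rw [List.getElem_reverse]
    congr 1
    omega
  have htw : x.length - 1 - i < (List.takeWhile PySem.Chars.isspace x.reverse).length := by
    have := List.takeWhile_append_dropWhile (p := PySem.Chars.isspace) (l := x.reverse)
    have hlen2 : (List.takeWhile PySem.Chars.isspace x.reverse).length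
        + (List.dropWhile PySem.Chars.isspace x.reverse).length = x.length := by
      rw [← List.length_append, this]; simp
    omega
  have hmem : x.reverse[x.length - 1 - i] ∈ List.takeWhile PySem.Chars.isspace x.reverse := by
    have hxr : x.reverse = List.takeWhile PySem.Chars.isspace x.reverse
        ++ List.dropWhile PySem.Chars.isspace x.reverse := (List.takeWhile_append_dropWhile).symm
    have h3 := List.getElem_of_eq hxr hjlt
    rw [List.getElem_append_left htw] at h3
    rw [h3]
    exact List.getElem_mem htw
  have := List.mem_takeWhile_imp hmem
  rwa [he] at this

-- on a stripped string, stripping a prefix only strips on the right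
theorem pv_strip_take (t : List Char) (h : PySem.Chars.strip t = t) (j : Nat) :
    PySem.Chars.strip (t.take j) = PySem.Chars.rstrip (t.take j) := by
  unfold PySem.Chars.strip PySem.Chars.lstrip
  congr 1
  rw [List.dropWhile_eq_self_iff]
  intro hl
  have h0 : 0 < t.length := by simp at hl; omega
  have ht0 : ¬ PySem.Chars.isspace t[0] = true := by
    have := pv_lstrip_of_stripped h
    exact (List.dropWhile_eq_self_iff.mp this) h0
  simpa [List.getElem_take] using ht0

theorem pv_rstrip_rstrip (z : List Char) : PySem.Chars.rstrip (PySem.Chars.rstrip z) = PySem.Chars.rstrip z := by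
  unfold PySem.Chars.rstrip
  simp [List.dropWhile_idempotent]

theorem pv_strip_idem (x : List Char) : PySem.Chars.strip (PySem.Chars.strip x) = PySem.Chars.strip x := by
  have hc : PySem.Chars.lstrip (PySem.Chars.strip x) = PySem.Chars.strip x := by
    unfold PySem.Chars.lstrip
    rw [List.dropWhile_eq_self_iff]
    intro hl
    have hpre : PySem.Chars.strip x <+: PySem.Chars.lstrip x := pv_rstrip_prefix _
    have h0 : (PySem.Chars.strip x)[0] = (PySem.Chars.lstrip x)[0]'(by
        have := hpre.length_le; omega) := hpre.getElem hl
    rw [h0]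
    have : List.dropWhile PySem.Chars.isspace (PySem.Chars.lstrip x) = PySem.Chars.lstrip x := by
      unfold PySem.Chars.lstrip; exact List.dropWhile_idempotent _ _
    exact (List.dropWhile_eq_self_iff.mp this) _
  show PySem.Chars.rstrip (PySem.Chars.lstrip (PySem.Chars.strip x)) = PySem.Chars.strip x
  rw [hc]
  show PySem.Chars.rstrip (PySem.Chars.rstrip (PySem.Chars.lstrip x)) = _
  exact pv_rstrip_rstrip _

-- find s sub = p whenever sub occurs at p and nowhere earlier
theorem pv_find_eq_coe {s sub : List Char} {p : Nat} (h1 : sub <+: s.drop p)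
    (h2 : ∀ i, i < p → ¬ sub <+: s.drop i) : PySem.Chars.find s sub = (p : Int) := by
  have hinf : sub <:+: s := h1.isInfix.trans (List.drop_suffix p s).isInfix
  have hnn : 0 ≤ PySem.Chars.find s sub := (PySem.Chars.find_nonneg_iff s sub).mpr hinf
  obtain ⟨hocc, hmin⟩ := PySem.Chars.find_spec hnn
  have hq : (PySem.Chars.find s sub).toNat = p := by
    rcases Nat.lt_trichotomy (PySem.Chars.find s sub).toNat p with hlt | he | hgt
    · exact absurd hocc (h2 _ hlt)
    · exact he
    · exact absurd h1 (hmin _ hgt)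
  omega

theorem pv_find_neg {s sub : List Char} (h : ∀ i, ¬ sub <+: s.drop i) :
    PySem.Chars.find s sub = -1 := by
  rw [PySem.Chars.find_eq_neg_one_iff s sub]
  intro hinf
  obtain ⟨j, hj⟩ := (PySem.Chars.exists_prefix_drop_iff_isIn sub s).mpr
    ((PySem.Chars.isIn_iff_infix sub s).mpr hinf)
  exact h j hj

theorem pv_occ_ge_find {s sub : List Char} {q : Nat} (h : sub <+: s.drop q)
    (hf : 0 ≤ PySem.Chars.find s sub) : (PySem.Chars.find s sub).toNat ≤ q := by
  by_contra hq
  exact ((PySem.Chars.find_spec hf).2 q (by omega)) h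

-- occurrences inside a take are exactly the occurrences that fit before the cut
theorem pv_occ_take_iff {L m' : List Char} (hm : m' ≠ []) (n p : Nat) :
    m' <+: (L.take n).drop p ↔ m' <+: L.drop p ∧ p + m'.length ≤ n := by
  have hpos : 0 < m'.length := List.length_pos_of_ne_nil hm
  rw [List.drop_take, List.prefix_take_iff]
  constructor
  · rintro ⟨ha, hb⟩; exact ⟨ha, by omega⟩
  · rintro ⟨ha, hb⟩; exact ⟨ha, by omega⟩

-- proof-side characterisation of pvNoCross
theorem pv_noCross_spec {m m' : List Char} (h : pvNoCross m m' = true) {k : Nat}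
    (hk0 : 0 < k) (hk : k < m'.length) :
    ¬(m'.drop k <+: m) ∧ ¬(m <+: m'.drop k) := by
  have h' := List.all_eq_true.mp h k (List.mem_range.mpr hk)
  simp only [beq_iff_eq, Bool.or_eq_true, Bool.and_eq_true, Bool.not_eq_true'] at h'
  rcases h' with h' | h'
  · omega
  · constructor
    · intro hp
      rw [← List.isPrefixOf_iff_prefix] at hp
      rw [h'.1] at hp
      cases hp
    · intro hp
      rw [← List.isPrefixOf_iff_prefix] at hp
      rw [h'.2] at hp
      cases hp

-- an occurrence of a later marker cannot straddle the first occurrence of the current one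
theorem pv_cross_fit {L m m' : List Char} (hnc : pvNoCross m m' = true) {j p : Nat}
    (hm : m <+: L.drop j) (hm' : m' <+: L.drop p) (hpj : p < j) (hfit : j < p + m'.length) :
    False := by
  have hk0 : 0 < j - p := by omega
  have hk : j - p < m'.length := by omega
  have hd : m'.drop (j - p) <+: (L.drop p).drop (j - p) := hm'.drop (j - p)
  rw [List.drop_drop] at hd
  have hj : p + (j - p) = j := by omega
  rw [hj] at hd
  rcases List.prefix_or_prefix_of_prefix hd hm with hc | hc
  · exact (pv_noCross_spec hnc hk0 hk).1 hc
  · exact (pv_noCross_spec hnc hk0 hk).2 hc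

theorem pv_min?_filter_lt {l : List Nat} {p j : Nat} (h : l.min? = some p) (hpj : p < j) :
    (l.filter (fun x => x < j)).min? = some p := by
  obtain ⟨hmem, hle⟩ := List.min?_eq_some_iff.mp h
  refine List.min?_eq_some_iff.mpr ⟨List.mem_filter.mpr ⟨hmem, by simpa using hpj⟩, ?_⟩
  intro b hb
  exact hle b (List.mem_of_mem_filter hb)

theorem pv_filter_lt_nil {l : List Nat} {j : Nat} (h : ∀ x ∈ l, j ≤ x) :
    l.filter (fun x => x < j) = [] := by
  rw [List.filter_eq_nil_iff]
  intro a ha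
  simpa using Nat.not_lt.mpr (h a ha)

theorem pv_min?_cons_le {j : Nat} {l : List Nat} (h : ∀ x ∈ l, j ≤ x) :
    (j :: l).min? = some j := by
  refine List.min?_eq_some_iff.mpr ⟨List.mem_cons_self, ?_⟩
  intro b hb
  rcases List.mem_cons.mp hb with rfl | hb
  · exact Nat.le_refl _
  · exact h b hb

theorem pv_min?_cons_lt {j p : Nat} {l : List Nat} (h : l.min? = some p) (hpj : p < j) :
    (j :: l).min? = some p := by
  obtain ⟨hmem, hle⟩ := List.min?_eq_some_iff.mp h
  refine List.min?_eq_some_iff.mpr ⟨List.mem_cons_of_mem _ hmem, ?_⟩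
  intro b hb
  rcases List.mem_cons.mp hb with rfl | hb
  · exact Nat.le_of_lt hpj
  · exact hle b hb

theorem pv_strip_idemS (x : String) : PySem.Str.strip (PySem.Str.strip x) = PySem.Str.strip x := by
  apply String.toList_inj.mp
  simp only [PySem.Str.toList_strip]
  exact pv_strip_idem _

-- after cutting at marker m's first hit j, a later marker's hit survives exactly
-- when it lies before j, with the same index
theorem pv_hit_translate (t : List Char) (hstr : PySem.Chars.strip t = t) (m : List Char)
    {j : Nat} (hj : PySem.Chars.find (PySem.Chars.lower t) m = (j : Int))
    (m' : List Char) (hne : m' ≠ []) (hlast : m'.getLast?.all (fun c => !PySem.Chars.isspace c) = true)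
    (hnc : pvNoCross m m' = true) :
    pvHitC (PySem.Chars.strip (t.take j)) m' =
      (match pvHitC t m' with
        | some p => if p < j then some p else none
        | none => none) := by
  have hmlen : 0 < m'.length := List.length_pos_of_ne_nil hne
  have hjlen : j ≤ t.length := by
    have := PySem.Chars.find_le_length (PySem.Chars.lower t) m
    rw [hj] at this
    simpa [PySem.Chars.lower] using this
  have hoccm : m <+: (PySem.Chars.lower t).drop j := by
    have h0 : 0 ≤ PySem.Chars.find (PySem.Chars.lower t) m := by rw [hj]; exact Int.natCast_nonneg j
    have := (PySem.Chars.find_spec h0).1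
    rwa [hj] at this
  have hrs : PySem.Chars.strip (t.take j) = PySem.Chars.rstrip (t.take j) := pv_strip_take t hstr j
  set j' := (PySem.Chars.rstrip (t.take j)).length with hj'def
  have hlentake : (t.take j).length = j := by simp [hjlen]
  have hj'j : j' ≤ j := by
    have := (pv_rstrip_prefix (t.take j)).length_le
    omega
  have htake : PySem.Chars.strip (t.take j) = t.take j' := by
    rw [hrs]
    have := List.prefix_iff_eq_take.mp (pv_rstrip_prefix (t.take j))
    rw [this, List.take_take, ← hj'def, Nat.min_eq_left hj'j]
  have hlow : PySem.Chars.lower (PySem.Chars.strip (t.take j)) = (PySem.Chars.lower t).take j' := by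
    rw [htake]
    simp [PySem.Chars.lower, List.map_take]
  have hws : ∀ (i : Nat) (hb : i < (PySem.Chars.lower t).length), j' ≤ i → i < j →
      PySem.Chars.isspace ((PySem.Chars.lower t)[i]'hb) = true := by
    intro i hb hi1 hi2
    have hit : i < (t.take j).length := by omega
    have h1 := pv_rstrip_ws (t.take j) i (by omega) hit
    rw [List.getElem_take] at h1
    have h2 : (PySem.Chars.lower t)[i]'hb
        = PySem.Chars.lowerChar (t[i]'(by omega)) := by
      simp [PySem.Chars.lower]
    rw [h2, pv_ws_lowerChar]
    exact h1
  unfold pvHitC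
  rw [hlow]
  by_cases hfind : 0 ≤ PySem.Chars.find (PySem.Chars.lower t) m'
  · obtain ⟨hocc, hmin⟩ := PySem.Chars.find_spec hfind
    set p := (PySem.Chars.find (PySem.Chars.lower t) m').toNat with hpdef
    by_cases hplt : p < j
    · -- the hit survives with the same index
      have hfit1 : p + m'.length ≤ j := by
        by_contra hbad
        exact pv_cross_fit hnc hoccm hocc hplt (by omega)
      have hfit2 : p + m'.length ≤ j' := by
        by_contra hbad
        have hi1 : j' ≤ p + m'.length - 1 := by omega
        have hi2 : p + m'.length - 1 < j := by omega
        have hblen : p + m'.length - 1 < (PySem.Chars.lower t).length := by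
          simp only [PySem.Chars.lower, List.length_map]; omega
        have hwsi := hws (p + m'.length - 1) hblen hi1 hi2
        -- but that position holds the (non-whitespace) last char of m'
        have hc : m'[m'.length - 1]'(by omega)
            = (PySem.Chars.lower t)[p + (m'.length - 1)]'(by
                simp only [PySem.Chars.lower, List.length_map]; omega) := by
          have h5 := List.IsPrefix.getElem hocc (i := m'.length - 1) (by omega)
          rwa [List.getElem_drop] at h5
        have hpe : p + (m'.length - 1) = p + m'.length - 1 := by omega
        simp only [hpe] at hc
        have hlastc : m'.getLast? = some (m'[m'.length - 1]'(by omega)) := by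
          rw [List.getLast?_eq_getElem?, List.getElem?_eq_getElem (by omega)]
        have hlf : PySem.Chars.isspace (m'[m'.length - 1]'(by omega)) = false := by
          rw [hlastc] at hlast
          simpa using hlast
        rw [hc] at hlf
        rw [hwsi] at hlf
        exact absurd hlf (by simp)
      have hfeq : PySem.Chars.find ((PySem.Chars.lower t).take j') m' = (p : Int) := by
        apply pv_find_eq_coe
        · exact (pv_occ_take_iff hne j' p).mpr ⟨hocc, hfit2⟩
        · intro i hip hpre
          exact (hmin i hip) ((pv_occ_take_iff hne j' i).mp hpre).1
      rw [hfeq, if_pos (Int.natCast_nonneg p), if_pos hfind]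
      simp [hplt]
    · -- the hit was at or beyond the cut: it disappears
      have hfeq : PySem.Chars.find ((PySem.Chars.lower t).take j') m' = -1 := by
        apply pv_find_neg
        intro i hpre
        obtain ⟨hocc', hfit'⟩ := (pv_occ_take_iff hne j' i).mp hpre
        have := pv_occ_ge_find hocc' hfind
        omega
      rw [hfeq, if_pos hfind]
      simp [hplt]
  · -- no hit at all: still none after the cut
    have hfeq : PySem.Chars.find ((PySem.Chars.lower t).take j') m' = -1 := by
      apply pv_find_neg
      intro i hpre
      obtain ⟨hocc', _⟩ := (pv_occ_take_iff hne j' i).mp hpre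
      have hinf : m' <:+: PySem.Chars.lower t :=
        hocc'.isInfix.trans (List.drop_suffix i _).isInfix
      exact hfind ((PySem.Chars.find_nonneg_iff _ _).mpr hinf)
    rw [hfeq, if_neg hfind]
    simp

theorem pv_cut_prefix (t : List Char) (hstr : PySem.Chars.strip t = t) (j : Nat) (hjlen : j ≤ t.length) :
    ∃ j', j' ≤ j ∧ PySem.Chars.strip (t.take j) = t.take j' := by
  have hrs : PySem.Chars.strip (t.take j) = PySem.Chars.rstrip (t.take j) := pv_strip_take t hstr j
  refine ⟨(PySem.Chars.rstrip (t.take j)).length, ?_, ?_⟩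
  · have h1 : (t.take j).length = j := by simp [hjlen]
    have h2 := (pv_rstrip_prefix (t.take j)).length_le
    omega
  · rw [hrs]
    have h3 := List.prefix_iff_eq_take.mp (pv_rstrip_prefix (t.take j))
    rw [h3, List.take_take]
    congr 1
    have h2 := (pv_rstrip_prefix (t.take j)).length_le
    simp only [List.length_take]
    omega

theorem pv_hit_le {s m' : List Char} {q : Nat} (h : pvHitC s m' = some q) : q ≤ s.length := by
  by_cases hf : 0 ≤ PySem.Chars.find (PySem.Chars.lower s) m'
  · unfold pvHitC at h
    rw [if_pos hf] at h
    have := PySem.Chars.find_le_length (PySem.Chars.lower s) m'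
    have hl : (PySem.Chars.lower s).length = s.length := by simp [PySem.Chars.lower]
    simp only [Option.some.injEq] at h
    omega
  · unfold pvHitC at h
    rw [if_neg hf] at h
    cases h

theorem pv_hits_translate (t : List Char) (hstr : PySem.Chars.strip t = t) (m : List Char)
    {j : Nat} (hj : PySem.Chars.find (PySem.Chars.lower t) m = (j : Int))
    (ms : List (List Char))
    (hgood : ∀ m' ∈ ms, m' ≠ [] ∧ m'.getLast?.all (fun c => !PySem.Chars.isspace c) = true)
    (hnc : ∀ m' ∈ ms, pvNoCross m m' = true) :
    (ms.filterMap (pvHitC (PySem.Chars.strip (t.take j)))) =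
      (ms.filterMap (pvHitC t)).filter (fun p => p < j) := by
  induction ms with
  | nil => simp
  | cons m' ms ih =>
    have hg := hgood m' (List.mem_cons_self)
    have he := pv_hit_translate t hstr m hj m' hg.1 hg.2 (hnc m' List.mem_cons_self)
    have ih' := ih (fun x hx => hgood x (List.mem_cons_of_mem _ hx))
      (fun x hx => hnc x (List.mem_cons_of_mem _ hx))
    simp only [List.filterMap_cons]
    cases hcase : pvHitC t m' with
    | none =>
      rw [hcase] at he
      simp only at he
      rw [he, ih']
    | some p =>
      rw [hcase] at he
      simp only at he
      by_cases hp : p < j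
      · rw [he, if_pos hp, ih']
        try simp [hp]
      · rw [he, if_neg hp, ih']
        try simp [hp]

theorem pv_slice_take (t : List Char) (j : Nat) :
    PySem.Chars.slice t none (some (j : Int)) = t.take j := by
  rw [PySem.Chars.slice_eq_listSlice, PySem.List.slice_to_natCast]

-- A's sequential truncation loop equals the single cut at the leftmost per-marker hit
theorem pv_mainC : ∀ (ms : List (List Char)) (t : List Char), PySem.Chars.strip t = t →
    (∀ m' ∈ ms, m' ≠ [] ∧ m'.getLast?.all (fun c => !PySem.Chars.isspace c) = true) →
    List.Pairwise (fun m m' => pvNoCross m m' = true) ms →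
    ms.foldl pvStepC t = pvCutC t ms := by
  intro ms
  induction ms with
  | nil => intro t _ _ _; simp [pvCutC]
  | cons m ms ih =>
    intro t hstr hgood hpw
    have hgood' := fun x hx => hgood x (List.mem_cons_of_mem _ hx)
    have hpw' := hpw.of_cons
    have hncs : ∀ m' ∈ ms, pvNoCross m m' = true := fun m' hm' => (List.pairwise_cons.mp hpw).1 m' hm'
    rw [List.foldl_cons]
    by_cases hf : 0 ≤ PySem.Chars.find (PySem.Chars.lower t) m
    · set j := (PySem.Chars.find (PySem.Chars.lower t) m).toNat with hjdef
      have hj : PySem.Chars.find (PySem.Chars.lower t) m = (j : Int) := by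
        rw [hjdef, Int.toNat_of_nonneg hf]
      have hjlen : j ≤ t.length := by
        have := PySem.Chars.find_le_length (PySem.Chars.lower t) m
        have hl : (PySem.Chars.lower t).length = t.length := by simp [PySem.Chars.lower]
        omega
      have hstep : pvStepC t m = PySem.Chars.strip (t.take j) := by
        unfold pvStepC
        rw [if_pos hf, hj, pv_slice_take]
      have hstr' : PySem.Chars.strip (PySem.Chars.strip (t.take j)) = PySem.Chars.strip (t.take j) :=
        pv_strip_idem _
      rw [hstep, ih _ hstr' hgood' hpw']
      unfold pvCutC
      rw [pv_hits_translate t hstr m hj ms hgood' hncs]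
      have hhead : pvHitC t m = some j := by
        unfold pvHitC
        rw [if_pos hf, hjdef]
      rw [List.filterMap_cons, hhead]
      cases hmin : (ms.filterMap (pvHitC t)).min? with
      | none =>
        have hnil : ms.filterMap (pvHitC t) = [] := List.min?_eq_none_iff.mp hmin
        rw [hnil]
        show PySem.Chars.strip (t.take j) = PySem.Chars.strip (PySem.Chars.slice t none (some (j : Int)))
        rw [pv_slice_take]
      | some p =>
        by_cases hpj : p < j
        · rw [pv_min?_filter_lt hmin hpj, pv_min?_cons_lt hmin hpj]
          -- both sides cut at p; the left one inside the already-cut text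
          obtain ⟨j', hj'j, htake⟩ := pv_cut_prefix t hstr j hjlen
          have hple : p ≤ j' := by
            have hmem : p ∈ (ms.filterMap (pvHitC t)).filter (fun x => x < j) :=
              (List.min?_eq_some_iff.mp (pv_min?_filter_lt hmin hpj)).1
            rw [← pv_hits_translate t hstr m hj ms hgood' hncs] at hmem
            obtain ⟨m', _, hm'⟩ := List.mem_filterMap.mp hmem
            have := pv_hit_le hm'
            rw [htake] at this
            simp only [List.length_take] at this
            omega
          show PySem.Chars.strip (PySem.Chars.slice (PySem.Chars.strip (t.take j)) none (some (p : Int)))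
              = PySem.Chars.strip (PySem.Chars.slice t none (some (p : Int)))
          rw [htake, pv_slice_take, pv_slice_take, List.take_take, Nat.min_eq_left hple]
        · have hall : ∀ x ∈ ms.filterMap (pvHitC t), j ≤ x := by
            intro x hx
            have := (List.min?_eq_some_iff.mp hmin).2 x hx
            omega
          rw [pv_filter_lt_nil (fun x hx => hall x hx), pv_min?_cons_le (fun x hx => hall x hx)]
          show PySem.Chars.strip (t.take j) = PySem.Chars.strip (PySem.Chars.slice t none (some (j : Int)))
          rw [pv_slice_take]
    · have hstep : pvStepC t m = t := by unfold pvStepC; rw [if_neg hf]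
      have hhead : pvHitC t m = none := by unfold pvHitC; rw [if_neg hf]
      rw [hstep, ih _ hstr hgood' hpw']
      unfold pvCutC
      rw [List.filterMap_cons, hhead]

set_option maxRecDepth 8192 in
theorem pvM_eq : pvMarkers.map String.toList = pvMarkersC := by decide

theorem pvM_good : ∀ m' ∈ pvMarkersC, m' ≠ [] ∧ m'.getLast?.all (fun c => !PySem.Chars.isspace c) = true := by
  decide

set_option maxRecDepth 8192 in
theorem pvM_pw : List.Pairwise (fun m m' => pvNoCross m m' = true) pvMarkersC := by decide

theorem pv_foldl_toList : ∀ (ms : List String) (s : String),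
    (List.foldl (fun t marker =>
        let idx := PySem.Str.find (PySem.Str.lower t) marker
        if 0 ≤ idx then PySem.Str.strip (PySem.Str.slice t none (some idx)) else t) s ms).toList
    = List.foldl pvStepC s.toList (ms.map String.toList) := by
  intro ms
  induction ms with
  | nil => intro s; simp
  | cons m ms ih =>
    intro s
    rw [List.map_cons, List.foldl_cons, List.foldl_cons, ih]
    congr 1
    show (if 0 ≤ PySem.Str.find (PySem.Str.lower s) m then
        PySem.Str.strip (PySem.Str.slice s none (some (PySem.Str.find (PySem.Str.lower s) m)))
      else s).toList = pvStepC s.toList m.toList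
    have hfind : PySem.Str.find (PySem.Str.lower s) m
        = PySem.Chars.find (PySem.Chars.lower s.toList) m.toList := by
      simp [PySem.Str.find]
    unfold pvStepC
    rw [← hfind]
    by_cases h : 0 ≤ PySem.Str.find (PySem.Str.lower s) m
    · rw [if_pos h, if_pos h]
      simp
    · rw [if_neg h, if_neg h]

-- ----- the scanner of B equals the leftmost per-marker hit -----

theorem pv_scan_shift : ∀ (suf : List Char) (i : Nat),
    pvScan suf i = (pvScan suf 0).map (· + i) := by
  intro suf
  induction suf with
  | nil => intro i; simp [pvScan]
  | cons c rest ih =>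
    intro i
    by_cases h : pvMarkersC.any (fun m => PySem.Chars.startswith (c :: rest) m) = true
    · simp [pvScan, h]
    · simp only [pvScan, if_neg h]
      rw [ih (i + 1), ih 1, Option.map_map]
      congr 1
      funext x
      simp only [Function.comp_apply]
      omega

theorem pv_occ_cons_succ (c : Char) (rest : List Char) (k : Nat) :
    pvOcc (c :: rest) (k + 1) ↔ pvOcc rest k := by
  unfold pvOcc
  simp [List.drop_succ_cons]

-- pvScan low 0 returns exactly the least position where some marker occurs (none if none does)
theorem pv_scan0_spec : ∀ (low : List Char),
    (∀ j, pvScan low 0 = some j → pvOcc low j ∧ ∀ k, k < j → ¬ pvOcc low k) ∧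
    (pvScan low 0 = none → ∀ j, ¬ pvOcc low j) := by
  intro low
  induction low with
  | nil =>
    constructor
    · intro j hj; cases hj
    · intro _ j hocc
      obtain ⟨m, hm, hpre⟩ := hocc
      have hne := (pvM_good m hm).1
      have : m = [] := List.prefix_nil.mp (by simpa using hpre)
      exact hne this
  | cons c rest ih =>
    by_cases h : pvMarkersC.any (fun m => PySem.Chars.startswith (c :: rest) m) = true
    · constructor
      · intro j hj
        have hj0 : j = 0 := by
          simp only [pvScan, if_pos h, Option.some.injEq] at hj
          omega
        subst hj0
        refine ⟨?_, by omega⟩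
        obtain ⟨m, hm, hsw⟩ := List.any_eq_true.mp h
        exact ⟨m, hm, by simpa using (PySem.Chars.startswith_iff _ _).mp hsw⟩
      · intro hn
        rw [show pvScan (c :: rest) 0 = some 0 from by simp only [pvScan, if_pos h]] at hn
        cases hn
    · have hno0 : ¬ pvOcc (c :: rest) 0 := by
        intro hocc
        obtain ⟨m, hm, hpre⟩ := hocc
        apply h
        exact List.any_eq_true.mpr ⟨m, hm, (PySem.Chars.startswith_iff _ _).mpr (by simpa using hpre)⟩
      have heq : pvScan (c :: rest) 0 = (pvScan rest 0).map (· + 1) := by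
        simp only [pvScan, if_neg h]
        exact pv_scan_shift rest 1
      constructor
      · intro j hj
        rw [heq] at hj
        cases hrest : pvScan rest 0 with
        | none => rw [hrest] at hj; cases hj
        | some j0 =>
          rw [hrest] at hj
          simp only [Option.map_some, Option.some.injEq] at hj
          subst hj
          obtain ⟨hocc0, hmin0⟩ := (ih.1 j0 hrest)
          refine ⟨(pv_occ_cons_succ c rest j0).mpr hocc0, ?_⟩
          intro k hk
          cases k with
          | zero => exact hno0
          | succ k' =>
            intro hocck
            exact hmin0 k' (by omega) ((pv_occ_cons_succ c rest k').mp hocck)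
      · intro hn j
        rw [heq] at hn
        cases hrest : pvScan rest 0 with
        | some j0 => rw [hrest] at hn; cases hn
        | none =>
          cases j with
          | zero => exact hno0
          | succ j' =>
            intro hocc
            exact ih.2 hrest j' ((pv_occ_cons_succ c rest j').mp hocc)

-- the min? of the per-marker first hits is also exactly the least occurrence position
theorem pv_min_hits_spec (t : List Char) :
    (∀ p, (pvMarkersC.filterMap (pvHitC t)).min? = some p →
        pvOcc (PySem.Chars.lower t) p ∧ ∀ k, k < p → ¬ pvOcc (PySem.Chars.lower t) k) ∧
    ((pvMarkersC.filterMap (pvHitC t)).min? = none → ∀ j, ¬ pvOcc (PySem.Chars.lower t) j) := by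
  constructor
  · intro p hp
    obtain ⟨hmem, hle⟩ := List.min?_eq_some_iff.mp hp
    obtain ⟨m, hm, hhit⟩ := List.mem_filterMap.mp hmem
    have hf : 0 ≤ PySem.Chars.find (PySem.Chars.lower t) m := by
      by_contra hneg
      unfold pvHitC at hhit
      rw [if_neg hneg] at hhit
      cases hhit
    have hpval : (PySem.Chars.find (PySem.Chars.lower t) m).toNat = p := by
      unfold pvHitC at hhit
      rw [if_pos hf] at hhit
      simpa using hhit
    refine ⟨⟨m, hm, by rw [← hpval]; exact (PySem.Chars.find_spec hf).1⟩, ?_⟩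
    intro k hk hocc
    obtain ⟨m', hm', hpre⟩ := hocc
    have hinf : m' <:+: PySem.Chars.lower t :=
      hpre.isInfix.trans (List.drop_suffix k _).isInfix
    have hf' : 0 ≤ PySem.Chars.find (PySem.Chars.lower t) m' :=
      (PySem.Chars.find_nonneg_iff _ _).mpr hinf
    have hq : (PySem.Chars.find (PySem.Chars.lower t) m').toNat ≤ k := pv_occ_ge_find hpre hf'
    have hqm : (PySem.Chars.find (PySem.Chars.lower t) m').toNat ∈ pvMarkersC.filterMap (pvHitC t) := by
      refine List.mem_filterMap.mpr ⟨m', hm', ?_⟩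
      unfold pvHitC
      rw [if_pos hf']
    have := hle _ hqm
    omega
  · intro hn j hocc
    have hnil : pvMarkersC.filterMap (pvHitC t) = [] := List.min?_eq_none_iff.mp hn
    obtain ⟨m, hm, hpre⟩ := hocc
    have hinf : m <:+: PySem.Chars.lower t :=
      hpre.isInfix.trans (List.drop_suffix j _).isInfix
    have hf : 0 ≤ PySem.Chars.find (PySem.Chars.lower t) m :=
      (PySem.Chars.find_nonneg_iff _ _).mpr hinf
    have hmem : (PySem.Chars.find (PySem.Chars.lower t) m).toNat ∈ pvMarkersC.filterMap (pvHitC t) := by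
      refine List.mem_filterMap.mpr ⟨m, hm, ?_⟩
      unfold pvHitC
      rw [if_pos hf]
    rw [hnil] at hmem
    cases hmem

-- B's scan over the lowered text and the min? of A's per-marker hits pick the same position
theorem pv_scan_eq_min (t : List Char) :
    pvScan (PySem.Chars.lower t) 0 = (pvMarkersC.filterMap (pvHitC t)).min? := by
  cases hs : pvScan (PySem.Chars.lower t) 0 with
  | some j =>
    obtain ⟨hocc, hmin⟩ := (pv_scan0_spec (PySem.Chars.lower t)).1 j hs
    cases hm : (pvMarkersC.filterMap (pvHitC t)).min? with
    | some p =>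
      obtain ⟨hocc', hmin'⟩ := (pv_min_hits_spec t).1 p hm
      rcases Nat.lt_trichotomy j p with h | h | h
      · exact absurd hocc (hmin' j h)
      · rw [h]
      · exact absurd hocc' (hmin p h)
    | none => exact absurd hocc ((pv_min_hits_spec t).2 hm j)
  | none =>
    cases hm : (pvMarkersC.filterMap (pvHitC t)).min? with
    | some p =>
      obtain ⟨hocc', _⟩ := (pv_min_hits_spec t).1 p hm
      exact absurd hocc' ((pv_scan0_spec (PySem.Chars.lower t)).2 hs p)
    | none => rfl

-- Str-level: A's foldl over pvMarkers equals B's truncate-at-first-scan-hit, for stripped input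
theorem pv_loop_eq (s : String) (hs : PySem.Str.strip s = s) :
    pvMarkers.foldl (fun t marker =>
        let idx := PySem.Str.find (PySem.Str.lower t) marker
        if 0 ≤ idx then PySem.Str.strip (PySem.Str.slice t none (some idx)) else t) s =
    pvTruncateAtMarker s := by
  apply String.toList_inj.mp
  rw [pv_foldl_toList]
  have hstr : PySem.Chars.strip s.toList = s.toList := by
    have := congrArg String.toList hs
    simpa using this
  rw [pv_mainC (pvMarkers.map String.toList) s.toList hstr
    (by rw [pvM_eq]; exact pvM_good) (by rw [pvM_eq]; exact pvM_pw), pvM_eq]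
  unfold pvCutC pvTruncateAtMarker
  have hlow : (PySem.Str.lower s).toList = PySem.Chars.lower s.toList := by
    simp [PySem.Str.lower]
  rw [hlow, pv_scan_eq_min s.toList]
  cases hmin : (pvMarkersC.filterMap (pvHitC s.toList)).min? with
  | none => rfl
  | some j => simp

-- the tail of both ports after the (identical) prefix steps, for already-stripped input
theorem pv_tail_eq (s : String) (hs : PySem.Str.strip s = s) :
    (if PySem.Str.join " " (PySem.Str.split₀ (List.foldl (fun t marker =>
          if 0 ≤ PySem.Str.find (PySem.Str.lower t) marker then
            PySem.Str.strip (PySem.Str.slice t none (some (PySem.Str.find (PySem.Str.lower t) marker)))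
          else t) s pvMarkers)) = ""
      then ""
      else PySem.Str.join " " (PySem.Str.split₀ (List.foldl (fun t marker =>
          if 0 ≤ PySem.Str.find (PySem.Str.lower t) marker then
            PySem.Str.strip (PySem.Str.slice t none (some (PySem.Str.find (PySem.Str.lower t) marker)))
          else t) s pvMarkers))) =
    pvNormalizeWs (pvTruncateAtMarker s) := by
  have h := pv_loop_eq s hs
  simp only at h
  rw [h]
  unfold pvNormalizeWs
  split_ifs with hemp
  · exact hemp.symm
  · rfl

-- ===== VERDICT (by name: the statement is the Claim_ definition above) =====
theorem clean_question_text_py_spec : Claim_equal_clean_question_text_py := by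
  intro raw _
  unfold Spec_clean_question_text_py
  simp only [clean_question_text_py, clean_question_text_py_alt, pvDropQuestionPrefix]
  by_cases h0 : PySem.Str.strip (if raw = "" then "" else raw) = ""
  · simp [h0]
  · simp only [if_neg h0]
    by_cases hq : PySem.Str.startswith (PySem.Str.lower (PySem.Str.strip (if raw = "" then "" else raw))) "question:" = true
    · simp only [if_pos hq]
      exact pv_tail_eq _ (pv_strip_idemS _)
    · simp only [if_neg hq]
      exact pv_tail_eq _ (pv_strip_idemS _)
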